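-- pv_equiv track=rewrite | github.com/gunout/Dashboard_Chine_Army | Dashboard.py | simulate_aircraft_carriers
-- ===== SOURCE A (Python) =====
-- def simulate_aircraft_carriers(annees):
--     """Porte-avions en service"""
--     carriers = []
--     for annee in annees:
--         if annee < 2012:
--             carriers.append(0)
--         elif annee < 2019:
--             carriers.append(1)
--         elif annee < 2025:
--             carriers.append(2)
--         else:
--             carriers.append(3)
--     return carriers
-- ===== SOURCE B (Python) =====
-- def simulate_aircraft_carriers(annees):
--     """Porte-avions en service"""
--     carriers = [0] * len(annees)
--     for seuil in (2012, 2019, 2025):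
--         carriers = [c + (annee >= seuil) for c, annee in zip(carriers, annees)]
--     return carriers
-- ===== Notes on version B (the rewrite author's own statement) =====
-- stated objective: alternative
-- what changed: Instead of classifying each year with an if/elif chain in one pass, B starts from an all-zero count vector and makes one vectorized pass per commissioning threshold, incrementing every entry whose year has reached that threshold (staged passes; counts accumulate across passes).
import Mathlib
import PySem

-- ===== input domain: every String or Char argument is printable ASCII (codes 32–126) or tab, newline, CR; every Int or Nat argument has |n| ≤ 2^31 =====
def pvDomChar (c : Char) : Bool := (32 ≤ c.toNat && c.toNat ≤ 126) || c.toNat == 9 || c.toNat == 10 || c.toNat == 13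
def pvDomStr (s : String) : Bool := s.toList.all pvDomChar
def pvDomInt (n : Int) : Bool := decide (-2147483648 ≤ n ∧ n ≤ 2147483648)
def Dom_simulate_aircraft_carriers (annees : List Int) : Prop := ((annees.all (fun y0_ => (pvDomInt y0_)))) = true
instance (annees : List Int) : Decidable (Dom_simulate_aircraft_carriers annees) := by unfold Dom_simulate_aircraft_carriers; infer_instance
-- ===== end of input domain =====

-- B replaces A's per-element if/elif classification by three staged passes: start from zeros and increment each entry once per reached commissioning year (alternative decomposition, same values).


-- ===== PORT A =====
-- literal transliteration: loop over annees appending via the if/elif chain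
def simulate_aircraft_carriers (annees : List Int) : List Int :=
  annees.foldl (fun carriers annee =>
    if annee < 2012 then carriers ++ [0]
    else if annee < 2019 then carriers ++ [1]
    else if annee < 2025 then carriers ++ [2]
    else carriers ++ [3]) []

-- ===== PORT B =====
-- one staged pass: add 1 to every entry whose year reached the threshold
def carrierPass (seuil : Int) (carriers annees : List Int) : List Int :=
  List.zipWith (fun c annee => c + (if annee ≥ seuil then (1 : Int) else 0)) carriers annees

def simulate_aircraft_carriers_alt (annees : List Int) : List Int :=
  [2012, 2019, 2025].foldl (fun carriers seuil => carrierPass seuil carriers annees)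
    (List.replicate annees.length 0)

-- ===== PRECONDITION & SPEC =====
def Spec_simulate_aircraft_carriers (annees : List Int) (out : List Int) : Prop := out = simulate_aircraft_carriers_alt annees
instance (annees : List Int) (out : List Int) : Decidable (Spec_simulate_aircraft_carriers annees out) := by unfold Spec_simulate_aircraft_carriers; infer_instance

-- ===== CLAIM (what is proved, stated in full; the proofs are below) =====
def Claim_equal_simulate_aircraft_carriers : Prop := ∀ (annees : List Int), Dom_simulate_aircraft_carriers annees → Spec_simulate_aircraft_carriers annees (simulate_aircraft_carriers annees)

-- ===== LEMMAS AND PROOFS =====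

-- A's fold with a generalized accumulator maps each year through the chain
theorem foldA_eq (annees : List Int) (acc : List Int) :
    annees.foldl (fun carriers annee =>
      if annee < 2012 then carriers ++ [0]
      else if annee < 2019 then carriers ++ [1]
      else if annee < 2025 then carriers ++ [2]
      else carriers ++ [3]) acc
    = acc ++ annees.map (fun annee =>
        if annee < 2012 then (0 : Int)
        else if annee < 2019 then 1
        else if annee < 2025 then 2
        else 3) := by
  induction annees generalizing acc with
  | nil => simp
  | cons a t ih =>
    simp only [List.foldl_cons, List.map_cons]
    split_ifs <;> rw [ih] <;> simp
    
-- B's three staged passes compute, per position, the sum of the three indicators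
theorem altB_eq (annees : List Int) :
    simulate_aircraft_carriers_alt annees
    = annees.map (fun annee =>
        (if annee ≥ 2012 then (1 : Int) else 0)
        + (if annee ≥ 2019 then 1 else 0)
        + (if annee ≥ 2025 then 1 else 0)) := by
  unfold simulate_aircraft_carriers_alt carrierPass
  simp only [List.foldl_cons, List.foldl_nil]
  induction annees with
  | nil => simp
  | cons a t ih =>
    simp only [List.length_cons, List.replicate_succ, List.zipWith_cons_cons, List.map_cons]
    rw [ih]
    simp [add_assoc]

-- ===== VERDICT (by name: the statement is the Claim_ definition above) =====
theorem simulate_aircraft_carriers_spec : Claim_equal_simulate_aircraft_carriers := by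
  intro annees _
  unfold Spec_simulate_aircraft_carriers simulate_aircraft_carriers
  rw [altB_eq, foldA_eq]
  simp only [List.nil_append]
  exact List.map_congr_left (fun a _ => by split_ifs <;> omega)
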